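-- pv_equiv track=rewrite | github.com/SergeantSuj/fantasy-baseball | scripts/build_baseline_rankings.py | dedupe_player_rows
-- ===== SOURCE A (Python) =====
-- import unicodedata
--
-- def normalize_name(name: str) -> str:
--     normalized = unicodedata.normalize("NFKD", name).encode("ascii", "ignore").decode("ascii")
--     normalized = normalized.lower().replace(".", " ").replace("-", " ")
--     normalized = " ".join(normalized.split())
--     return normalized
--
-- def clean_value(value: str | None) -> str:
--     return (value or "").strip()
--
-- def merge_positions(*values: str) -> str:
--     merged: list[str] = []
--     for value in values:
--         for position in (value or "").split("/"):
--             position = position.strip().upper()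
--             if position and position not in merged:
--                 merged.append(position)
--     return "/".join(merged)
--
-- def player_key(row: dict[str, str]) -> str:
--     return clean_value(row.get("mlbam_id")) or normalize_name(clean_value(row.get("player_name")))
--
-- def dedupe_player_rows(rows: list[dict[str, str]]) -> list[dict[str, str]]:
--     merged_by_key: dict[str, dict[str, str]] = {}
--     order: list[str] = []
--
--     for row in rows:
--         key = player_key(row)
--         if key not in merged_by_key:
--             merged_by_key[key] = dict(row)
--             order.append(key)
--             continue
--
--         existing = merged_by_key[key]
--         for field, value in row.items():
--             if not clean_value(existing.get(field)) and clean_value(value):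
--                 existing[field] = value
--
--         existing["eligible_positions"] = merge_positions(existing.get("eligible_positions", ""), row.get("eligible_positions", ""))
--         existing["source_positions_espn"] = merge_positions(existing.get("source_positions_espn", ""), row.get("source_positions_espn", ""))
--         existing["source_positions_yahoo"] = merge_positions(existing.get("source_positions_yahoo", ""), row.get("source_positions_yahoo", ""))
--         existing["source_positions_razzball"] = merge_positions(existing.get("source_positions_razzball", ""), row.get("source_positions_razzball", ""))
--
--         player_types = {clean_value(existing.get("player_type")), clean_value(row.get("player_type"))}
--         if "hitter" in player_types and "pitcher" in player_types:
--             existing["player_type"] = "two-way"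
--             existing["primary_position"] = existing.get("primary_position") or "TWP"
--
--     return [merged_by_key[key] for key in order]
-- ===== SOURCE B (Python) =====
-- import unicodedata
--
--
-- def normalize_name(name: str) -> str:
--     normalized = unicodedata.normalize("NFKD", name).encode("ascii", "ignore").decode("ascii")
--     normalized = normalized.lower().replace(".", " ").replace("-", " ")
--     normalized = " ".join(normalized.split())
--     return normalized
--
--
-- def clean_value(value: str | None) -> str:
--     return (value or "").strip()
--
--
-- def merge_positions(*values: str) -> str:
--     parts = [p.strip().upper() for v in values for p in (v or "").split("/")]
--     return "/".join([p for p in dict.fromkeys(parts) if p])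
--
--
-- def player_key(row: dict[str, str]) -> str:
--     return clean_value(row.get("mlbam_id")) or normalize_name(clean_value(row.get("player_name")))
--
--
-- POSITION_FIELDS = (
--     "eligible_positions",
--     "source_positions_espn",
--     "source_positions_yahoo",
--     "source_positions_razzball",
-- )
--
--
-- def _merge_group(group: list[dict[str, str]]) -> dict[str, str]:
--     acc = dict(group[0])
--     for row in group[1:]:
--         for field, value in row.items():
--             if not clean_value(acc.get(field)) and clean_value(value):
--                 acc[field] = value
--         for field in POSITION_FIELDS:
--             acc[field] = merge_positions(acc.get(field, ""), row.get(field, ""))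
--         types = {clean_value(acc.get("player_type")), clean_value(row.get("player_type"))}
--         if "hitter" in types and "pitcher" in types:
--             acc["player_type"] = "two-way"
--             acc["primary_position"] = acc.get("primary_position") or "TWP"
--     return acc
--
--
-- def dedupe_player_rows(rows: list[dict[str, str]]) -> list[dict[str, str]]:
--     # Repeatedly partition the remaining rows on the first row's key: no dict of
--     # accumulators, no key index -- each output row is built from its whole group at once.
--     out: list[dict[str, str]] = []
--     pending = list(rows)
--     while pending:
--         key = player_key(pending[0])
--         group = [row for row in pending if player_key(row) == key]
--         pending = [row for row in pending[1:] if player_key(row) != key]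
--         out.append(_merge_group(group))
--     return out
-- ===== Notes on version B (the rewrite author's own statement) =====
-- stated objective: alternative
-- what changed: B drops A's dict-of-accumulators and order list entirely: it repeatedly partitions the remaining rows on the first row's key and builds each output row from its whole group at once, and merge_positions dedupes via dict.fromkeys over a flattened part list instead of a membership-scan append loop.
import Mathlib
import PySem

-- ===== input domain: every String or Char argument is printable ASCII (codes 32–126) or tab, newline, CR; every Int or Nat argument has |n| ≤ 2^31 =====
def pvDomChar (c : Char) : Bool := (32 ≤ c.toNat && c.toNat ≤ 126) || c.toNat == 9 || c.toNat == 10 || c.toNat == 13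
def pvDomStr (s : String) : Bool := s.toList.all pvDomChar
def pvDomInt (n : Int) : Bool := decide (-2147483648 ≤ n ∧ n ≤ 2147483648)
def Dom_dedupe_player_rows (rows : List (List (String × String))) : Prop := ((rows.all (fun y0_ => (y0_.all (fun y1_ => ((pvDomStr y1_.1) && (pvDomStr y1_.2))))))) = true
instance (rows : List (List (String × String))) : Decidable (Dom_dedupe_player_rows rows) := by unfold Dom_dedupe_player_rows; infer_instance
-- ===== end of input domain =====

-- B re-implements dedupe_player_rows without A's dict-of-accumulators/order-list: it repeatedly
-- partitions the remaining rows on the first row's key and merges each whole group at once, and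
-- merge_positions dedupes via dict.fromkeys instead of a membership-scan append loop (alternative
-- decomposition, same results).
-- Shared module helpers (used by both Pythons): clean_value, normalize_name, player_key.
-- unicodedata.normalize("NFKD", ·).encode("ascii","ignore") is the identity on the ASCII input domain
-- Dom_dedupe_player_rows, so normalizeName ports only the lower/replace/split-join steps.

def cleanValue (s : String) : String := PySem.Str.strip s

def normalizeName (name : String) : String :=
  let n := PySem.Str.replace (PySem.Str.replace (PySem.Str.lower name) "." " ") "-" " "
  PySem.Str.join " " (PySem.Str.split₀ n)

-- row.get(k): the row dict as assoc list, first match (rows have unique keys)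
def rowGet (row : List (String × String)) (k : String) : String := (row.lookup k).getD ""

def playerKey (row : List (String × String)) : String :=
  let m := cleanValue (rowGet row "mlbam_id")
  if m ≠ "" then m else normalizeName (cleanValue (rowGet row "player_name"))

-- ===== PORT A =====
def mergePositions (a b : String) : String :=
  let merged := [a, b].foldl (fun m v =>
    ((PySem.Str.split? v "/").getD []).foldl (fun m p =>
      let p := PySem.Str.upper (PySem.Str.strip p)
      if p ≠ "" ∧ p ∉ m then m ++ [p] else m) m) []
  PySem.Str.join "/" merged

-- the body of A's 'else' branch: field-fill, four position merges, two-way rule (mutating 'existing')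
def mergeRowA (acc : PySem.Dict String String) (row : List (String × String)) : PySem.Dict String String :=
  let e := row.foldl (fun e fv =>
    if cleanValue ((e.get? fv.1).getD "") = "" ∧ cleanValue fv.2 ≠ "" then e.insert fv.1 fv.2 else e) acc
  let e := e.insert "eligible_positions" (mergePositions (e.getD "eligible_positions" "") (rowGet row "eligible_positions"))
  let e := e.insert "source_positions_espn" (mergePositions (e.getD "source_positions_espn" "") (rowGet row "source_positions_espn"))
  let e := e.insert "source_positions_yahoo" (mergePositions (e.getD "source_positions_yahoo" "") (rowGet row "source_positions_yahoo"))
  let e := e.insert "source_positions_razzball" (mergePositions (e.getD "source_positions_razzball" "") (rowGet row "source_positions_razzball"))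
  let ptE := cleanValue ((e.get? "player_type").getD "")
  let ptR := cleanValue (rowGet row "player_type")
  if ("hitter" = ptE ∨ "hitter" = ptR) ∧ ("pitcher" = ptE ∨ "pitcher" = ptR) then
    let e := e.insert "player_type" "two-way"
    let pp := (e.get? "primary_position").getD ""
    e.insert "primary_position" (if pp ≠ "" then pp else "TWP")
  else e

-- A's loop body: state = (merged_by_key, order)
def pvStepA (st : PySem.Dict String (PySem.Dict String String) × List String)
    (row : List (String × String)) : PySem.Dict String (PySem.Dict String String) × List String :=
  let key := playerKey row
  if st.1.contains key = false then
    (st.1.insert key (PySem.Dict.ofList row), st.2 ++ [key])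
  else
    (st.1.insert key (mergeRowA (st.1.getD key PySem.Dict.empty) row), st.2)

def dedupe_player_rows (rows : List (List (String × String))) : List (List (String × String)) :=
  let st := rows.foldl pvStepA ((PySem.Dict.empty : PySem.Dict String (PySem.Dict String String)), ([] : List String))
  st.2.map (fun k => (st.1.getD k PySem.Dict.empty).items)

-- ===== PORT B =====
-- Source B's merge_positions: flatten both slash-lists, dedupe with dict.fromkeys, drop blanks
def mergePositionsB (a b : String) : String :=
  let parts := [a, b].flatMap (fun v =>
    ((PySem.Str.split? v "/").getD []).map (fun p => PySem.Str.upper (PySem.Str.strip p)))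
  PySem.Str.join "/" ((PySem.List.dedup parts).filter (fun p => p != ""))

def posFields : List String :=
  ["eligible_positions", "source_positions_espn", "source_positions_yahoo", "source_positions_razzball"]

-- one iteration of _merge_group's inner loop
def mergeRowB (acc : PySem.Dict String String) (row : List (String × String)) : PySem.Dict String String :=
  let e := row.foldl (fun e fv =>
    if cleanValue ((e.get? fv.1).getD "") = "" ∧ cleanValue fv.2 ≠ "" then e.insert fv.1 fv.2 else e) acc
  let e := posFields.foldl (fun e f => e.insert f (mergePositionsB (e.getD f "") (rowGet row f))) e
  let ptE := cleanValue ((e.get? "player_type").getD "")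
  let ptR := cleanValue (rowGet row "player_type")
  if ("hitter" = ptE ∨ "hitter" = ptR) ∧ ("pitcher" = ptE ∨ "pitcher" = ptR) then
    let e := e.insert "player_type" "two-way"
    let pp := (e.get? "primary_position").getD ""
    e.insert "primary_position" (if pp ≠ "" then pp else "TWP")
  else e

-- Source B's _merge_group: acc = dict(group[0]); fold the rest (a group always has its head)
def pvMergeGroupB : List (List (String × String)) → List (String × String)
  | [] => []
  | first :: rest => (rest.foldl mergeRowB (PySem.Dict.ofList first)).items

-- Source B's while loop: partition the pending rows on the head row's key
def pvLoopB : List (List (String × String)) → List (List (String × String))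
  | [] => []
  | r :: rs =>
    pvMergeGroupB ((r :: rs).filter (fun x => playerKey x == playerKey r)) ::
      pvLoopB (rs.filter (fun x => playerKey x != playerKey r))
termination_by l => l.length
decreasing_by
  simp only [List.length_cons, List.length_unattach]
  exact Nat.lt_succ_of_le ((List.length_filter_le _ _).trans (by simp))

def dedupe_player_rows_alt (rows : List (List (String × String))) : List (List (String × String)) :=
  pvLoopB rows

-- ===== PRECONDITION & SPEC =====
def Spec_dedupe_player_rows (rows : List (List (String × String))) (out : List (List (String × String))) : Prop := out = dedupe_player_rows_alt rows
instance (rows : List (List (String × String))) (out : List (List (String × String))) : Decidable (Spec_dedupe_player_rows rows out) := by unfold Spec_dedupe_player_rows; infer_instance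

-- ===== CLAIM (what is proved, stated in full; the proofs are below) =====
def Claim_equal_dedupe_player_rows : Prop := ∀ (rows : List (List (String × String))), Dom_dedupe_player_rows rows → Spec_dedupe_player_rows rows (dedupe_player_rows rows)

-- ===== LEMMAS AND PROOFS =====

-- merge_positions: dedup-then-drop-blanks equals A's conditional append loop
theorem pv_filter_update (l s : List String) :
    (PySem.Set.update s l).filter (fun p => p != "") =
      l.foldl (fun m p => if p ≠ "" ∧ p ∉ m then m ++ [p] else m) (s.filter (fun p => p != "")) := by
  induction l generalizing s with
  | nil => rfl
  | cons x l ih =>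
    rw [PySem.Set.update_cons, ih]
    have hadd : (PySem.Set.add s x).filter (fun p => p != "") =
        (if x ≠ "" ∧ x ∉ s.filter (fun p => p != "") then s.filter (fun p => p != "") ++ [x]
         else s.filter (fun p => p != "")) := by
      by_cases hx : x ∈ s
      · rw [PySem.Set.add_of_mem hx]
        by_cases hxe : x = ""
        · simp [hxe]
        · have : x ∈ s.filter (fun p => p != "") := List.mem_filter.mpr ⟨hx, by simp [hxe]⟩
          simp [this]
      · rw [PySem.Set.add_of_not_mem hx]
        by_cases hxe : x = ""
        · simp [hxe, List.filter_append]
        · have hnm : x ∉ s.filter (fun p => p != "") := fun h => hx (List.mem_filter.mp h).1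
          simp [List.filter_append, hxe, hnm]
    rw [hadd]
    rfl

theorem pv_mp_eq : ∀ a b, mergePositionsB a b = mergePositions a b := by
  intro a b
  unfold mergePositionsB mergePositions
  have h := pv_filter_update
    ((((PySem.Str.split? a "/").getD []).map (fun p => PySem.Str.upper (PySem.Str.strip p))) ++
     (((PySem.Str.split? b "/").getD []).map (fun p => PySem.Str.upper (PySem.Str.strip p)))) []
  simp only [List.flatMap_cons, List.flatMap_nil, List.append_nil]
  rw [PySem.List.dedup_eq_ofList, ← PySem.Set.update_nil_left, h]
  simp only [List.filter_nil, List.foldl_append, List.foldl_map, List.foldl_cons, List.foldl_nil]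

theorem pv_mergeRow_eq : mergeRowB = mergeRowA := by
  funext acc row
  unfold mergeRowB mergeRowA posFields
  simp only [pv_mp_eq, List.foldl_cons, List.foldl_nil]

-- the merged dict a group folds to (A's merge step)
def mgD : List (List (String × String)) → PySem.Dict String String
  | [] => PySem.Dict.empty
  | first :: rest => rest.foldl mergeRowA (PySem.Dict.ofList first)

theorem mgD_append (l : List (List (String × String))) (r : List (String × String)) (h : l ≠ []) :
    mgD (l ++ [r]) = mergeRowA (mgD l) r := by
  cases l with
  | nil => exact absurd rfl h
  | cons a t => simp [mgD, List.foldl_append]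

-- proof-side grouping step: groups.setdefault(key, []).append(row)
def pvStepG (g : PySem.Dict String (List (List (String × String))))
    (row : List (String × String)) : PySem.Dict String (List (List (String × String))) :=
  g.modify (playerKey row) [] (· ++ [row])

-- the loop invariant tying A's (merged_by_key, order) to the grouping dict
def pvInv (d : PySem.Dict String (PySem.Dict String String)) (ord : List String)
    (g : PySem.Dict String (List (List (String × String)))) : Prop :=
  ord = g.keys ∧ g.keys.Nodup ∧
  (∀ k, d.contains k = g.contains k) ∧
  (∀ k, g.contains k = true →
    g.getD k [] ≠ [] ∧ d.getD k PySem.Dict.empty = mgD (g.getD k []))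

theorem pvInv_step (d : PySem.Dict String (PySem.Dict String String)) (ord : List String)
    (g : PySem.Dict String (List (List (String × String)))) (row : List (String × String))
    (h : pvInv d ord g) :
    pvInv (pvStepA (d, ord) row).1 (pvStepA (d, ord) row).2 (pvStepG g row) := by
  obtain ⟨hord, hnd, hcont, hval⟩ := h
  have hg : pvStepG g row = g.modify (playerKey row) [] (· ++ [row]) := rfl
  by_cases hc : g.contains (playerKey row) = true
  · -- existing key: A merges into the stored dict, the grouping appends to the group
    have hdc : d.contains (playerKey row) = true := by rw [hcont]; exact hc
    have hstep : pvStepA (d, ord) row =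
        (d.insert (playerKey row) (mergeRowA (d.getD (playerKey row) PySem.Dict.empty) row), ord) := by
      simp [pvStepA, hdc]
    have hkeys : (pvStepG g row).keys = g.keys := by
      rw [hg, PySem.Dict.keys_modify, PySem.Dict.keys_insert_of_contains _ _ hc]
    rw [hstep, hg]
    refine ⟨by rw [← hg, hkeys]; exact hord, by rw [← hg, hkeys]; exact hnd, ?_, ?_⟩
    · intro k
      rw [PySem.Dict.contains_insert, PySem.Dict.contains_modify, hcont]
    · intro k hk
      by_cases hek : k = playerKey row
      · subst hek
        obtain ⟨hne, heq⟩ := hval (playerKey row) hc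
        refine ⟨by rw [PySem.Dict.getD_modify_self]; simp, ?_⟩
        rw [PySem.Dict.getD_modify_self, PySem.Dict.getD_insert]
        rw [if_pos rfl, heq, mgD_append _ _ hne]
      · rw [PySem.Dict.contains_modify] at hk
        have hgk : g.contains k = true := by
          rcases Bool.or_eq_true_iff.mp hk with h1 | h1
          · exact absurd (by simpa using h1) hek
          · exact h1
        obtain ⟨hne, heq⟩ := hval k hgk
        rw [PySem.Dict.getD_modify_of_ne _ _ _ hek, PySem.Dict.getD_insert, if_neg hek]
        exact ⟨hne, heq⟩
  · -- new key: A inserts dict(row) and appends the key to order, the grouping starts a fresh group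
    have hcfalse : g.contains (playerKey row) = false := by simpa using hc
    have hdc : d.contains (playerKey row) = false := by rw [hcont]; exact hcfalse
    have hstep : pvStepA (d, ord) row =
        (d.insert (playerKey row) (PySem.Dict.ofList row), ord ++ [playerKey row]) := by
      simp [pvStepA, hdc]
    have hkeys : (pvStepG g row).keys = g.keys ++ [playerKey row] := by
      rw [hg, PySem.Dict.keys_modify, PySem.Dict.keys_insert_of_not_contains _ _ hcfalse]
    have hnotmem : playerKey row ∉ g.keys := by
      intro hm
      rw [(PySem.Dict.contains_iff_mem_keys g (playerKey row)).mpr hm] at hcfalse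
      cases hcfalse
    rw [hstep, hg]
    refine ⟨by rw [← hg, hkeys, hord], ?_, ?_, ?_⟩
    · rw [← hg, hkeys]
      simp [List.nodup_append, hnd]
      exact fun a ha h1 => hnotmem (h1 ▸ ha)
    · intro k
      rw [PySem.Dict.contains_insert, PySem.Dict.contains_modify, hcont]
    · intro k hk
      by_cases hek : k = playerKey row
      · subst hek
        refine ⟨?_, ?_⟩
        · rw [PySem.Dict.getD_modify_self, PySem.Dict.getD_of_not_contains _ _ hcfalse]; simp
        · rw [PySem.Dict.getD_modify_self, PySem.Dict.getD_of_not_contains _ _ hcfalse,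
            PySem.Dict.getD_insert, if_pos rfl]
          rfl
      · rw [PySem.Dict.contains_modify] at hk
        have hgk : g.contains k = true := by
          rcases Bool.or_eq_true_iff.mp hk with h1 | h1
          · exact absurd (by simpa using h1) hek
          · exact h1
        obtain ⟨hne, heq⟩ := hval k hgk
        rw [PySem.Dict.getD_modify_of_ne _ _ _ hek, PySem.Dict.getD_insert, if_neg hek]
        exact ⟨hne, heq⟩

theorem pvInv_fold (rows : List (List (String × String))) :
    ∀ (d : PySem.Dict String (PySem.Dict String String)) (ord : List String)
      (g : PySem.Dict String (List (List (String × String)))), pvInv d ord g →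
    pvInv (rows.foldl pvStepA (d, ord)).1 (rows.foldl pvStepA (d, ord)).2 (rows.foldl pvStepG g) := by
  induction rows with
  | nil => intro d ord g h; exact h
  | cons r rs ih =>
    intro d ord g h
    simp only [List.foldl_cons]
    have h' := pvInv_step d ord g r h
    have := ih (pvStepA (d, ord) r).1 (pvStepA (d, ord) r).2 (pvStepG g r) h'
    simpa using this

-- characterization of the grouping dict: keys = first-seen keys, groups = filters
theorem pv_G_keys (rows : List (List (String × String))) :
    (rows.foldl pvStepG PySem.Dict.empty).keys = PySem.Set.ofList (rows.map playerKey) := by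
  have h := PySem.Dict.keys_foldl_modify_key (l := rows) (key := playerKey)
    (d0 := ([] : List (List (String × String))))
    (f := fun _ r => (fun cur => cur ++ [r])) (d := PySem.Dict.empty)
  rw [show rows.foldl pvStepG PySem.Dict.empty =
      rows.foldl (fun d x => d.modify (playerKey x) []
        ((fun (_ : PySem.Dict String (List (List (String × String)))) (r : List (String × String)) =>
          (fun cur => cur ++ [r])) d x)) PySem.Dict.empty from rfl, h]
  simp [PySem.Dict.keys_empty, PySem.Set.update_nil_left]

theorem pv_G_getD (rows : List (List (String × String))) (c : String) :
    (rows.foldl pvStepG PySem.Dict.empty).getD c [] = rows.filter (fun r => playerKey r == c) := by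
  have hmap : rows.foldl pvStepG PySem.Dict.empty =
      (rows.map (fun r => (playerKey r, r))).foldl
        (fun d p => d.modify p.1 [] (· ++ [p.2])) PySem.Dict.empty := by
    rw [List.foldl_map]
    rfl
  rw [hmap, PySem.Dict.getD_foldl_modify_append]
  simp only [PySem.Dict.getD_empty, List.nil_append, List.filter_map, List.map_map]
  rw [show ((fun (p : String × List (String × String)) => p.1 == c) ∘ fun r => (playerKey r, r)) =
      (fun r => playerKey r == c) from rfl]
  rw [show ((fun (p : String × List (String × String)) => p.2) ∘ fun r => (playerKey r, r)) =
      id from rfl, List.map_id]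

-- dedup commutes with filtering out one element
theorem pv_ofList_filter (l : List String) (x : String) :
    PySem.Set.ofList (l.filter (fun y => y != x)) = (PySem.Set.ofList l).filter (fun y => y != x) := by
  induction l with
  | nil => rfl
  | cons y l ih =>
    have hdisc : ∀ (s : PySem.Set String) (z : String),
        PySem.Set.discard s z = s.filter (fun w => w != z) := fun _ _ => rfl
    by_cases hyx : y = x
    · subst hyx
      rw [PySem.Set.ofList_cons]
      simp only [List.filter_cons, bne_self_eq_false, Bool.false_eq_true, if_false, ih, hdisc,
        List.filter_filter, Bool.and_self]
    · have hb : (y != x) = true := by simp [hyx]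
      rw [PySem.Set.ofList_cons]
      simp only [List.filter_cons, hb, if_true, PySem.Set.ofList_cons, ih, hdisc,
        List.filter_filter]
      congr 1
      apply List.filter_congr
      intro z _
      exact Bool.and_comm _ _

theorem pv_keys_cons (r : List (String × String)) (rs : List (List (String × String))) :
    PySem.Set.ofList ((r :: rs).map playerKey) =
      playerKey r :: PySem.Set.ofList ((rs.filter (fun x => playerKey x != playerKey r)).map playerKey) := by
  rw [List.map_cons, PySem.Set.ofList_cons]
  congr 1
  have hmf : (rs.filter (fun x => playerKey x != playerKey r)).map playerKey =
      (rs.map playerKey).filter (fun y => y != playerKey r) := by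
    rw [List.filter_map]
    rfl
  rw [hmf, pv_ofList_filter]
  rfl

-- A's characterized output equals B's partition loop
set_option maxHeartbeats 1000000 in
theorem pv_main_aux : ∀ (n : Nat) (rows : List (List (String × String))), rows.length ≤ n →
    (PySem.Set.ofList (rows.map playerKey)).map
      (fun k => (mgD (rows.filter (fun r => playerKey r == k))).items) = pvLoopB rows := by
  intro n
  induction n with
  | zero =>
    intro rows h
    cases rows with
    | nil => simp [pvLoopB]
    | cons r rs => simp at h
  | succ n ih =>
    intro rows hlen
    cases rows with
    | nil => simp [pvLoopB]
    | cons r rs =>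
      rw [pv_keys_cons, List.map_cons]
      conv_rhs => rw [pvLoopB]
      refine congrArg₂ (· :: ·) ?_ ?_
      · -- head group
        have hfilter : (r :: rs).filter (fun x => playerKey x == playerKey r) =
            r :: rs.filter (fun x => playerKey x == playerKey r) := by
          simp
        rw [hfilter]
        simp [pvMergeGroupB, mgD, pv_mergeRow_eq]
      · -- remaining groups
        have hlen' : (rs.filter (fun x => playerKey x != playerKey r)).length ≤ n := by
          have h1 := List.length_filter_le (fun x => playerKey x != playerKey r) rs
          simp only [List.length_cons] at hlen
          omega
        rw [← ih _ hlen']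
        apply List.map_congr_left
        intro k hk
        have hkr : k ≠ playerKey r := by
          have hmem : k ∈ (rs.filter (fun x => playerKey x != playerKey r)).map playerKey := by
            simpa using hk
          obtain ⟨x, hx, hxk⟩ := List.mem_map.mp hmem
          obtain ⟨_, hxf⟩ := List.mem_filter.mp hx
          intro hkr
          rw [hxk, hkr] at hxf
          simp at hxf
        have h1 : (r :: rs).filter (fun x => playerKey x == k) =
            rs.filter (fun x => playerKey x == k) := by
          have : (playerKey r == k) = false := by simp [Ne.symm hkr]
          simp [this]
        have h2 : (rs.filter (fun x => playerKey x != playerKey r)).filter (fun x => playerKey x == k) =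
            rs.filter (fun x => playerKey x == k) := by
          rw [List.filter_filter]
          apply List.filter_congr
          intro x _
          by_cases h : playerKey x = k
          · simp [h, hkr]
          · simp [h]
        rw [h1, ← h2]

-- A's characterized output equals B's partition loop
theorem pv_main (rows : List (List (String × String))) :
    (PySem.Set.ofList (rows.map playerKey)).map
      (fun k => (mgD (rows.filter (fun r => playerKey r == k))).items) = pvLoopB rows :=
  pv_main_aux rows.length rows (Nat.le_refl _)

-- A's output characterized through the grouping dict
theorem pv_A_char (rows : List (List (String × String))) :
    dedupe_player_rows rows =
      (PySem.Set.ofList (rows.map playerKey)).map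
        (fun k => (mgD (rows.filter (fun r => playerKey r == k))).items) := by
  have hinv := pvInv_fold rows PySem.Dict.empty [] PySem.Dict.empty
    (by refine ⟨?_, ?_, ?_, ?_⟩ <;> simp [PySem.Dict.keys_empty, PySem.Dict.contains_empty])
  obtain ⟨hord, hnd, hcont, hval⟩ := hinv
  show (rows.foldl pvStepA (PySem.Dict.empty, [])).2.map
      (fun k => ((rows.foldl pvStepA (PySem.Dict.empty, [])).1.getD k PySem.Dict.empty).items) = _
  rw [hord, pv_G_keys]
  apply List.map_congr_left
  intro k hk
  have hc : (rows.foldl pvStepG PySem.Dict.empty).contains k = true := by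
    rw [PySem.Dict.contains_iff_mem_keys, pv_G_keys]
    exact hk
  obtain ⟨hne, heq⟩ := hval k hc
  rw [heq, pv_G_getD]

-- ===== VERDICT (by name: the statement is the Claim_ definition above) =====
theorem dedupe_player_rows_spec : Claim_equal_dedupe_player_rows := by
  intro rows _
  show dedupe_player_rows rows = dedupe_player_rows_alt rows
  rw [pv_A_char, pv_main]
  rfl
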